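-- pv_equiv track=rewrite | github.com/harsh78552/Python-problem-solving | Practice Problem on Strings/Uncommon Words from Two Sentences.py | uncommon_words
-- ===== SOURCE A (Python) =====
-- def uncommon_words(string_, string2__):
--     dict_ = {}
--     dict__ = {}
--     uncommon_words_list = []
--     for j in string_.split():
--         if j not in dict_:
--             dict_[j] = 1
--         else:
--             dict_[j] += 1
--     for j in string2__.split():
--         if j not in dict__:
--             dict__[j] = 1
--         else:
--             dict__[j] += 1
--     for key, value in dict_.items():
--         if value == 1:
--             if key not in dict__:
--                 uncommon_words_list.append(key)
--     for key, value in dict__.items():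
--         if value == 1:
--             if key not in dict_:
--                 uncommon_words_list.append(key)
--
--     return uncommon_words_list
-- ===== SOURCE B (Python) =====
-- def uncommon_words(string_, string2__):
--     counts = {}
--     for w in string_.split() + string2__.split():
--         counts[w] = counts.get(w, 0) + 1
--     return [w for w, c in counts.items() if c == 1]
-- ===== Notes on version B (the rewrite author's own statement) =====
-- stated objective: simpler
-- what changed: Replaces A's two per-sentence dicts and two cross-membership filter loops with one combined frequency dict over the concatenated word lists and a single filter for total count 1.
import Mathlib
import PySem

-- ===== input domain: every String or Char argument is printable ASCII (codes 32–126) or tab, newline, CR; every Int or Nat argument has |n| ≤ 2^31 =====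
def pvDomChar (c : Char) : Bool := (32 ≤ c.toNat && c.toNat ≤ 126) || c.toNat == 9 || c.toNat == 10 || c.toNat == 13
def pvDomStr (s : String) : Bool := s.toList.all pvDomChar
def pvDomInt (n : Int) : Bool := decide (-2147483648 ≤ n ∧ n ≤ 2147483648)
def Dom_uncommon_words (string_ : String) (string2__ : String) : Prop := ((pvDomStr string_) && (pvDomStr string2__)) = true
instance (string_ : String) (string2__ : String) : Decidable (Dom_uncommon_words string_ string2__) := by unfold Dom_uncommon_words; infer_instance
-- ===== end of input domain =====

-- B builds one combined frequency dict over both sentences' words and filters total count == 1,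
-- replacing A's two per-sentence dicts and two cross-membership filter loops (objective: simpler).


-- ===== PORT A =====
def uncommon_words (string_ : String) (string2__ : String) : List String :=
  let dict_ : PySem.Dict String Int :=
    (PySem.Str.split₀ string_).foldl
      (fun d j => if !d.contains j then d.insert j 1 else d.insert j (d.getD j 0 + 1))
      PySem.Dict.empty
  let dict__ : PySem.Dict String Int :=
    (PySem.Str.split₀ string2__).foldl
      (fun d j => if !d.contains j then d.insert j 1 else d.insert j (d.getD j 0 + 1))
      PySem.Dict.empty
  let l1 := dict_.items.foldl
    (fun acc kv => if kv.2 == 1 then (if !dict__.contains kv.1 then acc ++ [kv.1] else acc) else acc)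
    []
  dict__.items.foldl
    (fun acc kv => if kv.2 == 1 then (if !dict_.contains kv.1 then acc ++ [kv.1] else acc) else acc)
    l1

-- ===== PORT B =====
def uncommon_words_alt (string_ : String) (string2__ : String) : List String :=
  let counts : PySem.Dict String Int :=
    (PySem.Str.split₀ string_ ++ PySem.Str.split₀ string2__).foldl
      (fun d w => d.insert w (d.getD w 0 + 1)) PySem.Dict.empty
  (counts.items.filter (fun wc => wc.2 == 1)).map (·.1)

-- ===== PRECONDITION & SPEC =====
def Spec_uncommon_words (string_ : String) (string2__ : String) (out : List String) : Prop := out = uncommon_words_alt string_ string2__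
instance (string_ : String) (string2__ : String) (out : List String) : Decidable (Spec_uncommon_words string_ string2__ out) := by unfold Spec_uncommon_words; infer_instance

-- ===== CLAIM (what is proved, stated in full; the proofs are below) =====
def Claim_equal_uncommon_words : Prop := ∀ (string_ : String) (string2__ : String), Dom_uncommon_words string_ string2__ → Spec_uncommon_words string_ string2__ (uncommon_words string_ string2__)

-- ===== LEMMAS AND PROOFS =====

-- A's counting loop (separate branches for new/existing key) is Counter(xs).
theorem loopA_eq_counter (xs : List String) :
    xs.foldl (fun d j => if !d.contains j then d.insert j 1 else d.insert j (d.getD j 0 + 1))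
      (PySem.Dict.empty : PySem.Dict String Int) = PySem.Dict.counter xs := by
  rw [← PySem.Dict.foldl_insert_getD_add_one_eq_counter]
  apply PySem.List.foldl_congr_mem
  intro d j _
  by_cases h : d.contains j
  · simp [h]
  · simp only [Bool.not_eq_true] at h
    simp [h, PySem.Dict.getD_of_not_contains d 0 h]

-- A's append loop is a filter + map over the items.
theorem loopOut (d : PySem.Dict String Int) (q : String → Bool) (acc : List String) :
    d.items.foldl
      (fun acc kv => if kv.2 == 1 then (if !q kv.1 then acc ++ [kv.1] else acc) else acc) acc
    = acc ++ (d.items.filter (fun kv => kv.2 == 1 && !q kv.1)).map (·.1) := by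
  rw [← PySem.List.foldl_append_if (fun (kv : String × Int) => kv.2 == 1 && !q kv.1)
    (fun kv => kv.1) d.items acc]
  apply PySem.List.foldl_congr_mem
  intro a kv _
  by_cases h1 : kv.2 == 1 <;> by_cases h2 : q kv.1 <;> simp [h1, h2]

-- filter-of-items-of-a-counter, reduced to a filter on the key list.
theorem fm (f : String → Int) (p : String × Int → Bool) (s : List String) :
    ((s.map (fun k => (k, f k))).filter p).map (·.1) = s.filter (fun k => p (k, f k)) := by
  simp [List.filter_map, List.map_map, Function.comp_def]

theorem uncommon_core (L1 L2 : List String) :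
    ((PySem.Dict.counter L1).items.filter
        (fun kv => kv.2 == 1 && !(PySem.Dict.counter L2).contains kv.1)).map (·.1)
      ++ ((PySem.Dict.counter L2).items.filter
        (fun kv => kv.2 == 1 && !(PySem.Dict.counter L1).contains kv.1)).map (·.1)
    = ((PySem.Dict.counter (L1 ++ L2)).items.filter (fun wc => wc.2 == 1)).map (·.1) := by
  simp only [PySem.Dict.items_counter, PySem.Dict.contains_counter, fm]
  rw [PySem.Set.ofList_append, PySem.Set.update_eq_append_filter, List.filter_append,
    List.filter_filter]
  congr 1
  · apply List.filter_congr
    intro k hk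
    rw [PySem.Set.mem_ofList] at hk
    have hc1 : 1 ≤ List.count k L1 := List.one_le_count_iff.mpr hk
    rw [Bool.eq_iff_iff]
    simp only [Bool.and_eq_true, beq_iff_eq, Bool.not_eq_true',
      List.contains_eq_mem, decide_eq_false_iff_not, ← List.count_eq_zero, List.count_append]
    push_cast
    omega
  · apply List.filter_congr
    intro k hk
    rw [PySem.Set.mem_ofList] at hk
    have hc2 : 1 ≤ List.count k L2 := List.one_le_count_iff.mpr hk
    rw [Bool.eq_iff_iff]
    simp only [Bool.and_eq_true, beq_iff_eq, Bool.not_eq_true',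
      List.contains_eq_mem, decide_eq_false_iff_not, PySem.Set.contains, PySem.Set.mem_ofList,
      ← List.count_eq_zero, List.count_append]
    push_cast
    omega

-- ===== VERDICT (by name: the statement is the Claim_ definition above) =====
theorem uncommon_words_spec : Claim_equal_uncommon_words := by
  intro s1 s2 _
  unfold Spec_uncommon_words uncommon_words uncommon_words_alt
  simp only [loopA_eq_counter, loopOut, PySem.Dict.foldl_insert_getD_add_one_eq_counter,
    List.nil_append]
  exact uncommon_core _ _
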